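-- pv_equiv track=rewrite | github.com/EGMfoxl/AD-blocker-adgh | data/Deleterules.py | remove_subsumed_domain_rules
-- ===== SOURCE A (Python) =====
-- def remove_subsumed_domain_rules(domain_rules):
--     """移除被包含的域名规则"""
--     # 使用前缀树处理包含关系
--     trie = {}
--     for rule, domain in domain_rules:
--         node = trie
--         for part in domain.split('.'):
--             if part not in node:
--                 node[part] = {}
--             node = node[part]
--         node['__end__'] = rule
--
--     # 从前缀树提取最小规则集
--     def extract_rules(node):
--         if '__end__' in node:
--             return [node['__end__']]
--         rules = []
--         for key, child in node.items():
--             if key != '__end__':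
--                 rules.extend(extract_rules(child))
--         return rules
--
--     return extract_rules(trie)
-- ===== SOURCE B (Python) =====
-- def remove_subsumed_domain_rules(domain_rules):
--     """移除被包含的域名规则 — single recursive group-by pass, no trie."""
--     def go(entries):
--         ends = [rule for rule, parts in entries if not parts]
--         if ends:
--             return [ends[-1]]
--         heads = list(dict.fromkeys(parts[0] for rule, parts in entries))
--         return [rule
--                 for h in heads
--                 for rule in go([(r, ps[1:]) for r, ps in entries if ps[0] == h])]
--     return go([(rule, domain.split('.')) for rule, domain in domain_rules])
-- ===== Notes on version B (the rewrite author's own statement) =====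
-- stated objective: alternative
-- what changed: B replaces A's mutable nested-dict trie plus separate recursive extraction with one recursive function that groups (rule, parts) entries by their first domain label (first-occurrence order via dict.fromkeys) and recurses on the tails, short-circuiting on the last rule whose parts are exhausted; no trie is ever built.
-- outside the precondition, e.g. on remove_subsumed_domain_rules([('r', '__end__')]): A returns [{'__end__': 'r'}], B returns ['r']
import Mathlib
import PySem

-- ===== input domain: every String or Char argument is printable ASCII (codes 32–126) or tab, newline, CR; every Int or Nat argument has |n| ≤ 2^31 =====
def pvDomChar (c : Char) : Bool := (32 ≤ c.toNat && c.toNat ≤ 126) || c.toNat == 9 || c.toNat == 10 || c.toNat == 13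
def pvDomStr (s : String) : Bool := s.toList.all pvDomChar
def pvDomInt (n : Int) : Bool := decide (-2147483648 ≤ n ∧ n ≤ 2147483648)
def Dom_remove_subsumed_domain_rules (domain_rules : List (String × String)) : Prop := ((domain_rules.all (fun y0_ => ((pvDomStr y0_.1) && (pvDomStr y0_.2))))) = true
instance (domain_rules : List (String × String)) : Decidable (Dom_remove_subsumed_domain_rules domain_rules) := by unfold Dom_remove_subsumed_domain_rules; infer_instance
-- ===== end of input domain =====

-- B replaces A's nested-dict trie + separate recursive extraction by a single recursive
-- group-by-first-label function over (rule, parts) entries (objective: alternative, not faster).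

-- ===== PORT A =====
-- A's trie node: a Python dict mapping domain labels to child dicts, plus the sentinel key
-- '__end__' holding a rule string.  Under Pre_ no label equals '__end__', so the node is
-- modelled as children (labels, in insertion order) plus a separate optional end slot.
mutual
inductive PTrie where
  | mk : Option String → PChildren → PTrie
  deriving DecidableEq, Repr
inductive PChildren where
  | nil : PChildren
  | cons : String → PTrie → PChildren → PChildren
  deriving DecidableEq, Repr
end

-- the building loop: 'for part in parts: if part not in node: node[part] = {}; node = node[part]'
-- then 'node["__end__"] = rule'
-- s.split('.'): the separator '.' is a nonempty literal, so split? is always 'some'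
def splitDot (s : String) : List String := (PySem.Str.split? s ".").getD []

mutual
def insertPathA : PTrie → List String → String → PTrie
  | .mk _ cs, [], r => .mk (some r) cs
  | .mk e cs, p :: ps, r => .mk e (insertChildA cs p ps r)
termination_by _t ps _ => (ps.length, 0, 0)
def insertChildA : PChildren → String → List String → String → PChildren
  | .nil, p, ps, r => .cons p (insertPathA (.mk none .nil) ps r) .nil   -- 'part not in node': append new child
  | .cons k t rest, p, ps, r =>
      if k = p then .cons k (insertPathA t ps r) rest                   -- descend into existing child
      else .cons k t (insertChildA rest p ps r)
termination_by cs _ ps _ => (ps.length, 1, sizeOf cs)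
end

-- 'def extract_rules(node): …'
mutual
def extractA : PTrie → List String
  | .mk (some r) _ => [r]            -- '__end__' present: return [node['__end__']]
  | .mk none cs => extractChildrenA cs
def extractChildrenA : PChildren → List String
  | .nil => []
  | .cons _ t rest => extractA t ++ extractChildrenA rest
end

def remove_subsumed_domain_rules (domain_rules : List (String × String)) : List String :=
  extractA (domain_rules.foldl
    (fun t rd => insertPathA t (splitDot rd.2) rd.1)
    (PTrie.mk none PChildren.nil))

-- ===== PORT B =====
-- termination measure for goB: total number of remaining domain labels
def mB (entries : List (String × List String)) : Nat :=
  (entries.map (fun e => e.2.length)).sum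

theorem mB_filter_le (entries : List (String × List String)) (k : String) :
    mB ((entries.filter (fun e => e.2.head? == some k)).map (fun e => (e.1, e.2.tail)))
      ≤ mB entries := by
  induction entries with
  | nil => simp [mB]
  | cons e rest ih =>
      rw [List.filter_cons]
      by_cases h : (e.2.head? == some k) = true
      · rw [if_pos h]
        have ht : e.2.tail.length ≤ e.2.length := by cases e.2 <;> simp
        simp only [mB, List.map_cons, List.sum_cons] at *
        omega
      · rw [if_neg h]
        simp only [mB, List.map_cons, List.sum_cons] at *
        omega

theorem mB_filter_lt (entries : List (String × List String)) (k : String)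
    (hw : ∃ e ∈ entries, e.2.head? = some k) :
    mB ((entries.filter (fun e => e.2.head? == some k)).map (fun e => (e.1, e.2.tail)))
      < mB entries := by
  induction entries with
  | nil => simp at hw
  | cons e rest ih =>
      rw [List.filter_cons]
      by_cases h : (e.2.head? == some k) = true
      · rw [if_pos h]
        have hlt : e.2.tail.length < e.2.length := by
          cases hv : e.2 with
          | nil => rw [hv] at h; simp at h
          | cons a l => simp
        have hle := mB_filter_le rest k
        simp only [mB, List.map_cons, List.sum_cons] at *
        omega
      · rw [if_neg h]
        obtain ⟨w, hw1, hw2⟩ := hw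
        rcases List.mem_cons.1 hw1 with rfl | hw1'
        · simp [hw2] at h
        · have := ih ⟨w, hw1', hw2⟩
          simp only [mB, List.map_cons, List.sum_cons] at *
          omega

-- two clean-up facts used only by goB's termination proof
theorem pv_aux {P : String × List String → Prop} (k : String) (l : List (Subtype P)) :
    (l.filter (fun x => x.1.2.head? == some k)).map (fun x => (x.1.1, x.1.2.tail))
      = ((l.map Subtype.val).filter (fun e => e.2.head? == some k)).map (fun e => (e.1, e.2.tail)) := by
  induction l with
  | nil => rfl
  | cons a l ih =>
      simp only [List.map_cons, List.filter_cons]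
      by_cases h : (a.1.2.head? == some k) = true <;> simp [h, ih]

theorem pv_decr (entries : List (String × List String)) (k : String) :
    List.map (fun x : {x // x ∈ entries} => ((x : String × List String).1, (x : String × List String).2.tail))
        (List.filter (fun x : {x // x ∈ entries} => (x : String × List String).2.head? == some k) entries.attach)
      = (entries.filter (fun e => e.2.head? == some k)).map (fun e => (e.1, e.2.tail)) := by
  rw [pv_aux, List.attach_map_subtype_val]

-- 'def go(entries): …' from Source B; parts lists are all nonempty in the else branch,
-- so 'ps[0]' is ported as 'head?' (equal to 'some label' there).
def goB (entries : List (String × List String)) : List String :=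
  let ends := (entries.filter (fun e => e.2.isEmpty)).map Prod.fst
  if hne : ends ≠ [] then [ends.getLast hne]
  else
    let heads := PySem.List.dedup (entries.filterMap (fun e => e.2.head?))  -- list(dict.fromkeys(…))
    heads.attach.flatMap (fun k =>
      goB ((entries.filter (fun e => e.2.head? == some k.1)).map (fun e => (e.1, e.2.tail))))
termination_by mB entries
decreasing_by
  have hw : ∃ e ∈ entries, e.2.head? = some k.1 := by
    have hk := (PySem.List.mem_dedup _ _).1 k.2
    obtain ⟨⟨e, he⟩, -, hh⟩ := List.mem_filterMap.1 hk
    exact ⟨e, he, hh⟩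
  exact lt_of_eq_of_lt (congrArg mB (pv_decr entries k.1)) (mB_filter_lt entries k.1 hw)

def remove_subsumed_domain_rules_alt (domain_rules : List (String × String)) : List String :=
  goB (domain_rules.map (fun rd => (rd.1, splitDot rd.2)))

-- ===== PRECONDITION & SPEC =====
-- Pre_ excludes inputs where some domain's dot-split labels contain the literal string
-- '__end__': that is A's sentinel key, and on such inputs A either raises TypeError or
-- returns a list containing a dict instead of a rule string.
def Pre_remove_subsumed_domain_rules (domain_rules : List (String × String)) : Prop :=
  ∀ p ∈ domain_rules, "__end__" ∉ splitDot p.2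
instance (domain_rules : List (String × String)) : Decidable (Pre_remove_subsumed_domain_rules domain_rules) := by
  unfold Pre_remove_subsumed_domain_rules; infer_instance

def pvWitness_remove_subsumed_domain_rules : (List (String × String)) :=
  [("||a.com^", "a.com"), ("||b.a.com^", "b.a.com"), ("||c.org^", "c.org")]

def Spec_remove_subsumed_domain_rules (domain_rules : List (String × String)) (out : List String) : Prop := out = remove_subsumed_domain_rules_alt domain_rules
instance (domain_rules : List (String × String)) (out : List String) : Decidable (Spec_remove_subsumed_domain_rules domain_rules out) := by unfold Spec_remove_subsumed_domain_rules; infer_instance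

-- ===== CLAIM (what is proved, stated in full; the proofs are below) =====
def Claim_equal_remove_subsumed_domain_rules : Prop := ∀ (domain_rules : List (String × String)), Dom_remove_subsumed_domain_rules domain_rules → Pre_remove_subsumed_domain_rules domain_rules → Spec_remove_subsumed_domain_rules domain_rules (remove_subsumed_domain_rules domain_rules)

-- ===== LEMMAS AND PROOFS =====

def buildA (entries : List (String × List String)) : PTrie :=
  entries.foldl (fun t e => insertPathA t e.2 e.1) (PTrie.mk none PChildren.nil)

def endOf : PTrie → Option String
  | .mk e _ => e
def childrenOf : PTrie → PChildren
  | .mk _ cs => cs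

def subE (entries : List (String × List String)) (k : String) : List (String × List String) :=
  (entries.filter (fun e => e.2.head? == some k)).map (fun e => (e.1, e.2.tail))

def headsE (entries : List (String × List String)) : List String :=
  PySem.List.dedup (entries.filterMap (fun e => e.2.head?))

def chOf (entries : List (String × List String)) : List String → PChildren
  | [] => .nil
  | k :: ks => .cons k (buildA (subE entries k)) (chOf entries ks)

-- endsL L = the list 'ends' of goB;  L3: the end slot of the built trie is its last element
def endsL (L : List (String × List String)) : List String :=
  (L.filter (fun e => e.2.isEmpty)).map Prod.fst

theorem buildA_concat (L : List (String × List String)) (e : String × List String) :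
    buildA (L ++ [e]) = insertPathA (buildA L) e.2 e.1 := by
  simp [buildA, List.foldl_append]

theorem endOf_insertPathA (t : PTrie) (ps : List String) (r : String) :
    endOf (insertPathA t ps r) = if ps.isEmpty then some r else endOf t := by
  cases t with
  | mk e cs => cases ps <;> simp [insertPathA, endOf]

theorem endOf_buildA (L : List (String × List String)) :
    endOf (buildA L) = (endsL L).getLast? := by
  induction L using List.reverseRecOn with
  | nil => rfl
  | append_singleton L e ih =>
      rw [buildA_concat, endOf_insertPathA]
      by_cases h : e.2.isEmpty
      · simp [endsL, List.filter_append, h]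
      · simp [endsL, List.filter_append, h] at *
        exact ih

theorem subE_concat (L : List (String × List String)) (e : String × List String) (k : String) :
    subE (L ++ [e]) k
      = subE L k ++ (if e.2.head? == some k then [(e.1, e.2.tail)] else []) := by
  by_cases h : (e.2.head? == some k) = true <;>
    simp [subE, List.filter_append, h]

theorem mem_headsE (L : List (String × List String)) (k : String) (hk : k ∈ headsE L) :
    ∃ e ∈ L, e.2.head? = some k := by
  have := (PySem.List.mem_dedup _ _).1 hk
  exact List.mem_filterMap.1 this

theorem subE_eq_nil_of_not_mem (L : List (String × List String)) (k : String)
    (hk : k ∉ headsE L) : subE L k = [] := by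
  unfold subE
  rw [List.map_eq_nil_iff, List.filter_eq_nil_iff]
  intro e he
  simp only [beq_iff_eq]
  intro hh
  exact hk ((PySem.List.mem_dedup _ _).2 (List.mem_filterMap.2 ⟨e, he, hh⟩))

theorem headsE_concat_nil (L : List (String × List String)) (r : String) :
    headsE (L ++ [(r, ([] : List String))]) = headsE L := by
  simp [headsE, List.filterMap_append]

theorem headsE_concat_cons (L : List (String × List String)) (r p : String) (ps : List String) :
    headsE (L ++ [(r, p :: ps)])
      = if p ∈ headsE L then headsE L else headsE L ++ [p] := by
  unfold headsE
  rw [List.filterMap_append, PySem.List.dedup_eq_ofList, PySem.List.dedup_eq_ofList,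
      PySem.Set.ofList_eq_foldl, PySem.Set.ofList_eq_foldl, List.foldl_append]
  simp [PySem.Set.add, PySem.Set.contains]

theorem chOf_congr (L1 L2 : List (String × List String)) (ks : List String)
    (h : ∀ k ∈ ks, subE L1 k = subE L2 k) : chOf L1 ks = chOf L2 ks := by
  induction ks with
  | nil => rfl
  | cons k ks ih =>
      simp only [chOf]
      rw [h k (by simp), ih (fun k' hk' => h k' (by simp [hk']))]

theorem insertChildA_chOf_mem (L : List (String × List String)) (ks : List String)
    (p : String) (ps : List String) (r : String) (hnd : ks.Nodup) (hp : p ∈ ks) :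
    insertChildA (chOf L ks) p ps r = chOf (L ++ [(r, p :: ps)]) ks := by
  induction ks with
  | nil => simp at hp
  | cons k ks ih =>
      simp only [chOf, insertChildA]
      by_cases hkp : k = p
      · subst hkp
        rw [if_pos rfl]
        have h1 : subE (L ++ [(r, k :: ps)]) k = subE L k ++ [(r, ps)] := by
          rw [subE_concat]; simp
        have hnotin : k ∉ ks := (List.nodup_cons.1 hnd).1
        have h2 : chOf (L ++ [(r, k :: ps)]) ks = chOf L ks := by
          refine (chOf_congr _ _ _ ?_).symm
          intro k' hk'
          rw [subE_concat]
          have : k' ≠ k := fun hh => hnotin (hh ▸ hk')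
          simp [Ne.symm this]
        rw [h1, buildA_concat, h2]
      · rw [if_neg hkp]
        have hp' : p ∈ ks := by
          rcases List.mem_cons.1 hp with h | h
          · exact absurd h.symm hkp
          · exact h
        have h1 : subE (L ++ [(r, p :: ps)]) k = subE L k := by
          rw [subE_concat]; simp [Ne.symm hkp]
        rw [h1, ih (List.nodup_cons.1 hnd).2 hp']

theorem insertChildA_chOf_not_mem (L : List (String × List String)) (ks : List String)
    (p : String) (ps : List String) (r : String)
    (hp : p ∉ ks) (hsub : subE L p = []) :
    insertChildA (chOf L ks) p ps r = chOf (L ++ [(r, p :: ps)]) (ks ++ [p]) := by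
  induction ks with
  | nil =>
      simp only [chOf, insertChildA, List.nil_append]
      have h1 : subE (L ++ [(r, p :: ps)]) p = [(r, ps)] := by
        rw [subE_concat, hsub]; simp
      rw [h1]
      rfl
  | cons k ks ih =>
      have hkp : k ≠ p := fun hh => hp (hh ▸ List.mem_cons_self ..)
      simp only [chOf, insertChildA, List.cons_append]
      rw [if_neg hkp]
      have h1 : subE (L ++ [(r, p :: ps)]) k = subE L k := by
        rw [subE_concat]; simp [Ne.symm hkp]
      rw [h1, ih (fun hh => hp (List.mem_cons_of_mem _ hh))]

theorem childrenOf_insertPathA_cons (t : PTrie) (p : String) (ps : List String) (r : String) :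
    childrenOf (insertPathA t (p :: ps) r) = insertChildA (childrenOf t) p ps r := by
  cases t; simp [insertPathA, childrenOf]

theorem childrenOf_buildA (L : List (String × List String)) :
    childrenOf (buildA L) = chOf L (headsE L) := by
  induction L using List.reverseRecOn with
  | nil => rfl
  | append_singleton L e ih =>
      obtain ⟨r, d⟩ := e
      cases d with
      | nil =>
          rw [buildA_concat]
          have h1 : childrenOf (insertPathA (buildA L) [] r) = childrenOf (buildA L) := by
            cases hb : buildA L; simp [insertPathA, childrenOf]
          rw [h1, ih, headsE_concat_nil]
          refine chOf_congr _ _ _ ?_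
          intro k _
          rw [subE_concat]; simp
      | cons p ps =>
          rw [buildA_concat, childrenOf_insertPathA_cons, ih]
          show insertChildA (chOf L (headsE L)) p ps r
                = chOf (L ++ [(r, p :: ps)]) (headsE (L ++ [(r, p :: ps)]))
          have hnd : (headsE L).Nodup := PySem.List.nodup_dedup _
          by_cases hp : p ∈ headsE L
          · rw [insertChildA_chOf_mem L _ p ps r hnd hp,
                headsE_concat_cons, if_pos hp]
          · rw [insertChildA_chOf_not_mem L _ p ps r hp (subE_eq_nil_of_not_mem L p hp),
                headsE_concat_cons, if_neg hp]

theorem extractChildrenA_chOf (L : List (String × List String)) (ks : List String) :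
    extractChildrenA (chOf L ks)
      = ks.flatMap (fun k => extractA (buildA (subE L k))) := by
  induction ks with
  | nil => rfl
  | cons k ks ih => simp [chOf, extractChildrenA, ih]

theorem pv_flatMap_goB {P : String → Prop} (L : List (String × List String))
    (l : List (Subtype P)) :
    l.flatMap (fun x => goB (subE L x.1)) = l.unattach.flatMap (fun k => goB (subE L k)) := by
  induction l with
  | nil => rfl
  | cons a t ih => simp [List.flatMap_cons, ih, List.unattach_cons]

theorem goB_eq (L : List (String × List String)) :
    goB L = if hne : endsL L ≠ [] then [(endsL L).getLast hne]
      else (headsE L).attach.flatMap (fun k => goB (subE L k.1)) := by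
  rw [goB]
  rfl

theorem main_eq (L : List (String × List String)) :
    extractA (buildA L) = goB L := by
  have hIH : ∀ k ∈ headsE L, extractA (buildA (subE L k)) = goB (subE L k) := by
    intro k hk
    exact main_eq (subE L k)
  rw [goB_eq]
  by_cases hE : endsL L = []
  · rw [dif_neg (fun h => h hE)]
    have hend : endOf (buildA L) = none := by rw [endOf_buildA, hE]; rfl
    have hch := childrenOf_buildA L
    cases hb : buildA L with
    | mk E cs =>
        rw [hb] at hend hch
        simp only [endOf] at hend
        simp only [childrenOf] at hch
        subst hend
        rw [show extractA (PTrie.mk none cs) = extractChildrenA cs from by simp [extractA],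
            hch, extractChildrenA_chOf, pv_flatMap_goB, List.unattach_attach]
        exact (List.flatMap_congr (fun k hk => (hIH k hk).symm)).symm
  · have hne : endsL L ≠ [] := hE
    rw [dif_pos hne]
    have hend : endOf (buildA L) = some ((endsL L).getLast hne) := by
      rw [endOf_buildA, List.getLast?_eq_some_getLast hne]
    cases hb : buildA L with
    | mk E cs =>
        rw [hb] at hend
        simp only [endOf] at hend
        subst hend
        simp [extractA]
termination_by mB L
decreasing_by
  obtain ⟨e, he, hh⟩ := mem_headsE L k hk
  exact mB_filter_lt L k ⟨e, he, hh⟩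

-- ===== VERDICT (by name: the statement is the Claim_ definition above) =====
theorem remove_subsumed_domain_rules_spec : Claim_equal_remove_subsumed_domain_rules := by
  intro dr _ _
  unfold Spec_remove_subsumed_domain_rules remove_subsumed_domain_rules remove_subsumed_domain_rules_alt
  rw [← List.foldl_map (f := fun rd : String × String => (rd.1, splitDot rd.2))
        (g := fun t e => insertPathA t e.2 e.1)]
  exact main_eq _
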